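-- pv_equiv track=rewrite | github.com/volpertinger/KIB_PYTHON-hw1_stackmachine | StackMachineCompilator.py | make_procedure_map
-- ===== SOURCE A (Python) =====
-- def make_procedure_map(procedure_code):
--     f_new_procedure = True  # for correct dictionary of procedures
--     procedure_stack = []
--     procedure_name = None
--     procedures_map = {}
--     for element in procedure_code:
--         if element == ':':
--             f_new_procedure = True
--             procedure_stack = []
--             procedure_name = None
--             continue
--         if f_new_procedure:
--             procedure_name = element
--             f_new_procedure = False
--             continue
--         if not element == ";":
--             procedure_stack.append(element)
--         else:
--             procedure_stack.append("return")
--             procedures_map.update({procedure_name: procedure_stack})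
--     return procedures_map
-- ===== SOURCE B (Python) =====
-- def make_procedure_map(procedure_code):
--     # Split into ':'-delimited segments, then build the map from each segment:
--     # name = first token; stored iff the remaining tokens contain ';' ,
--     # value = remaining tokens with every ';' replaced by 'return'.
--     segments = []
--     current = []
--     for token in procedure_code:
--         if token == ':':
--             segments.append(current)
--             current = []
--         else:
--             current.append(token)
--     segments.append(current)
--     procedures_map = {}
--     for segment in segments:
--         if segment and ';' in segment[1:]:
--             procedures_map[segment[0]] = ['return' if t == ';' else t for t in segment[1:]]
--     return procedures_map
-- ===== Notes on version B (the rewrite author's own statement) =====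
-- stated objective: simpler
-- what changed: A's single flag-driven state machine (with a live list aliased into the dict) is replaced by a two-stage group-then-map decomposition: split the tokens into ':'-delimited segments, then for each segment whose body contains ';' map the body (';' -> 'return') under the segment's first token.
import Mathlib
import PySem

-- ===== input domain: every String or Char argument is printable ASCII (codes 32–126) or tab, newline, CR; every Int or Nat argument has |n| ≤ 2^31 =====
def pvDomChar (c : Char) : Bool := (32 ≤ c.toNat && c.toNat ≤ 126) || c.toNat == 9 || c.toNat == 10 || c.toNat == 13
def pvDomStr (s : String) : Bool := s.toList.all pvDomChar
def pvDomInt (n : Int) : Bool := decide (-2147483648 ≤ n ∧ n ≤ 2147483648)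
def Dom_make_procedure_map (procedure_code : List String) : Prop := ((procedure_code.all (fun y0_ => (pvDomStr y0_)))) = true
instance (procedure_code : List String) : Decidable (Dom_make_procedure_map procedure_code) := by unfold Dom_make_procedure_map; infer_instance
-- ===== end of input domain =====

-- B replaces A's flag-driven state machine by a group-then-map decomposition
-- (split on ':' into segments, then build the map per segment); objective: simpler.

-- ===== PORT A =====
-- A's loop state: (f_new_procedure, procedure_stack, procedure_name, procedures_map, inMap).
-- The extra Bool `inMap` models Python list aliasing exactly: after
-- `procedures_map.update({name: procedure_stack})` the dict entry IS the live
-- `procedure_stack` object, so every later append to the stack also changes the dict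
-- entry; `inMap` records whether the current stack object is stored in the dict.
def mpStateA : Type := Bool × List String × Option String × PySem.Dict String (List String) × Bool

def mpStepA (st : mpStateA) (element : String) : mpStateA :=
  let (f_new, stack, name, m, inMap) := st
  if element = ":" then (true, [], none, m, false)
  else if f_new then (false, stack, some element, m, inMap)
  else if ¬ element = ";" then
    let stack' := stack ++ [element]
    (false, stack', name,
      (if inMap then (match name with | some n => m.insert n stack' | none => m) else m), inMap)
  else
    let stack' := stack ++ ["return"]
    (false, stack', name,
      (match name with | some n => m.insert n stack' | none => m), true)

def make_procedure_map (procedure_code : List String) : List (String × List String) :=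
  ((procedure_code.foldl mpStepA (true, [], none, PySem.Dict.empty, false)).2.2.2.1).items

-- ===== PORT B =====
def mpStepB (sc : List (List String) × List String) (token : String) :
    List (List String) × List String :=
  if token = ":" then (sc.1 ++ [sc.2], []) else (sc.1, sc.2 ++ [token])

def mpInsB (m : PySem.Dict String (List String)) (segment : List String) :
    PySem.Dict String (List String) :=
  match segment with
  | [] => m
  | h :: rest =>
    if ";" ∈ rest then m.insert h (rest.map (fun t => if t = ";" then "return" else t)) else m

def make_procedure_map_alt (procedure_code : List String) : List (String × List String) :=
  let p := procedure_code.foldl mpStepB ([], [])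
  let segments := p.1 ++ [p.2]
  (segments.foldl mpInsB PySem.Dict.empty).items

-- ===== PRECONDITION & SPEC =====
def Spec_make_procedure_map (procedure_code : List String) (out : List (String × List String)) : Prop := out = make_procedure_map_alt procedure_code
instance (procedure_code : List String) (out : List (String × List String)) : Decidable (Spec_make_procedure_map procedure_code out) := by unfold Spec_make_procedure_map; infer_instance

-- ===== CLAIM (what is proved, stated in full; the proofs are below) =====
def Claim_equal_make_procedure_map : Prop := ∀ (procedure_code : List String), Dom_make_procedure_map procedure_code → Spec_make_procedure_map procedure_code (make_procedure_map procedure_code)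

-- ===== LEMMAS AND PROOFS =====

-- the ':'-delimited segments of a token list (prefix before the first ':' included)
def mpSplit : List String → List (List String)
  | [] => [[]]
  | t :: ts =>
    if t = ":" then [] :: mpSplit ts
    else
      match mpSplit ts with
      | [] => [[]]          -- unreachable: mpSplit never returns []
      | s :: ss => (t :: s) :: ss

def mpSub (t : String) : String := if t = ";" then "return" else t

lemma mpSplit_ne_nil (ts : List String) : mpSplit ts ≠ [] := by
  cases ts with
  | nil => simp [mpSplit]
  | cons t ts =>
    simp only [mpSplit]
    split
    · simp
    · split <;> simp

-- B's segment-building fold equals mpSplit (with a pending prefix)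
lemma mpStepB_split (ts : List String) :
    ∀ segs cur, (ts.foldl mpStepB (segs, cur)).1 ++ [(ts.foldl mpStepB (segs, cur)).2]
      = segs ++ (match mpSplit ts with
                 | [] => [cur]
                 | r :: rs => (cur ++ r) :: rs) := by
  induction ts with
  | nil => intro segs cur; simp [mpSplit]
  | cons t ts ih =>
    intro segs cur
    by_cases ht : t = ":"
    · simp only [List.foldl_cons, mpStepB, ht, mpSplit]
      rw [ih]
      cases h : mpSplit ts with
      | nil => exact absurd h (mpSplit_ne_nil ts)
      | cons r rs => simp
    · simp only [List.foldl_cons, mpStepB, if_neg ht, mpSplit]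
      rw [ih]
      cases h : mpSplit ts with
      | nil => exact absurd h (mpSplit_ne_nil ts)
      | cons r rs => simp

-- step lemmas for A's transition function
lemma mpStepA_colon (f : Bool) (s : List String) (name : Option String)
    (m : PySem.Dict String (List String)) (i : Bool) :
    mpStepA (f, s, name, m, i) ":" = (true, [], none, m, false) := by
  simp [mpStepA]

lemma mpStepA_fresh (t : String) (ht : t ≠ ":") (s : List String) (name : Option String)
    (m : PySem.Dict String (List String)) (i : Bool) :
    mpStepA (true, s, name, m, i) t = (false, s, some t, m, i) := by
  simp [mpStepA, ht]

lemma mpStepA_semi (s : List String) (n : String)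
    (m : PySem.Dict String (List String)) (i : Bool) :
    mpStepA (false, s, some n, m, i) ";"
      = (false, s ++ ["return"], some n, m.insert n (s ++ ["return"]), true) := by
  simp [mpStepA]

lemma mpStepA_tok (t : String) (ht : t ≠ ":") (hs : t ≠ ";") (s : List String) (n : String)
    (m : PySem.Dict String (List String)) (i : Bool) :
    mpStepA (false, s, some n, m, i) t
      = (false, s ++ [t], some n, if i then m.insert n (s ++ [t]) else m, i) := by
  cases i <;> simp [mpStepA, ht, hs]

-- A's loop, started on a fresh segment, computes B's per-segment folds.
-- Three mutually-strengthened statements over the remaining tokens: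
--   fresh:   state (true, [], none, m, false)
--   midOut:  state (false, s, some n, m, false)  (body started, nothing stored yet)
--   midIn:   state (false, s, some n, m, true)   (stack stored: m.insert n s = m)
lemma mpSub_semi : mpSub ";" = "return" := rfl

lemma mpSub_ne (t : String) (h : ¬ t = ";") : mpSub t = t := by simp [mpSub, h]

lemma mpSub_def : (fun t => if t = ";" then "return" else t) = mpSub := rfl

lemma mpA_run (ts : List String) :
    (∀ m, ((ts.foldl mpStepA (true, [], none, m, false)).2.2.2.1)
        = (mpSplit ts).foldl mpInsB m)
    ∧ (∀ s n m, ((ts.foldl mpStepA (false, s, some n, m, false)).2.2.2.1)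
        = (match mpSplit ts with
           | [] => m
           | r :: rs => rs.foldl mpInsB (if ";" ∈ r then m.insert n (s ++ r.map mpSub) else m)))
    ∧ (∀ s n m, m.insert n s = m →
        ((ts.foldl mpStepA (false, s, some n, m, true)).2.2.2.1)
        = (match mpSplit ts with
           | [] => m
           | r :: rs => rs.foldl mpInsB (m.insert n (s ++ r.map mpSub)))) := by
  induction ts with
  | nil =>
    refine ⟨fun m => by simp [mpSplit, mpInsB], fun s n m => by simp [mpSplit], ?_⟩
    intro s n m hm
    simpa [mpSplit] using hm.symm
  | cons t ts ih =>
    obtain ⟨ihF, ihO, ihI⟩ := ih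
    by_cases ht : t = ":"
    · subst ht
      refine ⟨fun m => ?_, fun s n m => ?_, fun s n m hm => ?_⟩
      · rw [List.foldl_cons, mpStepA_colon, ihF]; simp [mpSplit, mpInsB]
      · rw [List.foldl_cons, mpStepA_colon, ihF]; simp [mpSplit]
      · rw [List.foldl_cons, mpStepA_colon, ihF]; simp [mpSplit, hm]
    · by_cases hs : t = ";"
      · refine ⟨fun m => ?_, fun s n m => ?_, fun s n m hm => ?_⟩
        · -- fresh: t becomes the name (even ';' can be a name)
          rw [List.foldl_cons, mpStepA_fresh t ht, ihO]
          cases h : mpSplit ts with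
          | nil => exact absurd h (mpSplit_ne_nil ts)
          | cons r rs => simp [mpSplit, ht, h, mpInsB, mpSub_def]
        · subst hs
          rw [List.foldl_cons, mpStepA_semi,
            ihI _ _ _ (PySem.Dict.insert_insert_self _ _ _ _)]
          cases h : mpSplit ts with
          | nil => exact absurd h (mpSplit_ne_nil ts)
          | cons r rs =>
            simp [mpSplit, ht, h, mpSub_semi, PySem.Dict.insert_insert_self]
        · subst hs
          rw [List.foldl_cons, mpStepA_semi,
            ihI _ _ _ (PySem.Dict.insert_insert_self _ _ _ _)]
          cases h : mpSplit ts with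
          | nil => exact absurd h (mpSplit_ne_nil ts)
          | cons r rs =>
            simp [mpSplit, ht, h, mpSub_semi, PySem.Dict.insert_insert_self]
      · refine ⟨fun m => ?_, fun s n m => ?_, fun s n m hm => ?_⟩
        · rw [List.foldl_cons, mpStepA_fresh t ht, ihO]
          cases h : mpSplit ts with
          | nil => exact absurd h (mpSplit_ne_nil ts)
          | cons r rs => simp [mpSplit, ht, h, mpInsB, mpSub_def]
        · rw [List.foldl_cons, mpStepA_tok t ht hs, if_neg (by simp), ihO]
          cases h : mpSplit ts with
          | nil => exact absurd h (mpSplit_ne_nil ts)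
          | cons r rs => simp [mpSplit, ht, h, mpSub_ne, hs, Ne.symm hs]
        · rw [List.foldl_cons, mpStepA_tok t ht hs, if_pos rfl,
            ihI _ _ _ (PySem.Dict.insert_insert_self _ _ _ _)]
          cases h : mpSplit ts with
          | nil => exact absurd h (mpSplit_ne_nil ts)
          | cons r rs => simp [mpSplit, ht, h, mpSub_ne, hs, PySem.Dict.insert_insert_self]

-- ===== VERDICT (by name: the statement is the Claim_ definition above) =====
theorem make_procedure_map_spec : Claim_equal_make_procedure_map := by
  intro pc _
  show make_procedure_map pc = make_procedure_map_alt pc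
  have halt : make_procedure_map_alt pc
      = (((pc.foldl mpStepB ([], [])).1 ++ [(pc.foldl mpStepB ([], [])).2]).foldl
          mpInsB PySem.Dict.empty).items := rfl
  rw [halt, mpStepB_split pc [] [], List.nil_append]
  unfold make_procedure_map
  rw [(mpA_run pc).1]
  cases hsplit : mpSplit pc with
  | nil => exact absurd hsplit (mpSplit_ne_nil pc)
  | cons r rs => simp
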